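-- pv_equiv track=rewrite | github.com/cepxuozab/YandexTrainingAlgorithms | Training6/Lesson2/H_Openspace/task.py | make_prefix
-- ===== SOURCE A (Python) =====
-- def make_prefix(arr: list[int], needed_reverse=False) -> list[int]:
--     prefix = [0 for _ in range(len(arr))]
--     if needed_reverse:
--         arr.reverse()
--     curr = 0
--     for i in range(1, len(arr)):
--         curr += arr[i - 1]
--         prefix[i] = prefix[i - 1] + curr
--     if needed_reverse:
--         prefix.reverse()
--     return prefix
-- ===== SOURCE B (Python) =====
-- def make_prefix(arr: list[int], needed_reverse=False) -> list[int]: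
--     if needed_reverse:
--         arr.reverse()
--     # pass 1: inclusive running sums of arr
--     sums = []
--     c = 0
--     for x in arr:
--         c += x
--         sums.append(c)
--     # pass 2: exclusive running sums of `sums`
--     prefix = []
--     run = 0
--     for s in sums:
--         prefix.append(run)
--         run += s
--     if needed_reverse:
--         prefix.reverse()
--     return prefix
-- ===== Notes on version B (the rewrite author's own statement) =====
-- stated objective: simpler
-- what changed: Replaces A's single fused index loop (preallocated array, in-place writes via prefix[i-1] reads) with two plain value-driven passes: an inclusive running-sum scan of arr followed by an exclusive running-sum scan of that intermediate list.
import Mathlib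
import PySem

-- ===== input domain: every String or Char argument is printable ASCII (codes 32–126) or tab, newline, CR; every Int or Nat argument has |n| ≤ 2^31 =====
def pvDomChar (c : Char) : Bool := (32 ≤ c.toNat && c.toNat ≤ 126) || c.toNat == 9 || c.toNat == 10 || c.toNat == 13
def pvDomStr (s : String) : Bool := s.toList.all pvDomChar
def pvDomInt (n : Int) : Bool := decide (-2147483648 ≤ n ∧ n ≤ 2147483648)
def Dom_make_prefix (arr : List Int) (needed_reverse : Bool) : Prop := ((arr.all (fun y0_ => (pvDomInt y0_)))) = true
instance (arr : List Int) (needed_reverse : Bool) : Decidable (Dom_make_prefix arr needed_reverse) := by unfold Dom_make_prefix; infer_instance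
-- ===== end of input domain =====

-- B replaces A's single fused index loop with two value-driven running-sum passes (simpler decomposition).
-- Both Pythons reverse `arr` in place when needed_reverse is True; the equivalence proved here is about the return value.

-- ===== PORT A =====
-- loop body of A's 'for i in range(1, len(arr))'
def pvStepA (a : List Int) (st : Int × List Int) (i : Int) : Int × List Int :=
  let curr := st.1 + PySem.List.pyGetD a (i - 1) 0
  (curr, PySem.List.pySetD st.2 i (PySem.List.pyGetD st.2 (i - 1) 0 + curr))

def make_prefix (arr : List Int) (needed_reverse : Bool) : List Int :=
  let pref := List.replicate arr.length (0 : Int)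
  let a := if needed_reverse then arr.reverse else arr
  let st := (PySem.List.pyRange 1 (a.length : Int) 1).foldl (pvStepA a) (0, pref)
  if needed_reverse then st.2.reverse else st.2

-- ===== PORT B =====
-- first pass: inclusive running sums ('c += x; sums.append(c)')
def pvAccumInc (c : Int) : List Int → List Int
  | [] => []
  | x :: t => (c + x) :: pvAccumInc (c + x) t

-- second pass: exclusive running sums ('prefix.append(run); run += s')
def pvAccumExc (r : Int) : List Int → List Int
  | [] => []
  | s :: t => r :: pvAccumExc (r + s) t

def make_prefix_alt (arr : List Int) (needed_reverse : Bool) : List Int :=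
  let a := if needed_reverse then arr.reverse else arr
  let sums := pvAccumInc 0 a
  let pref := pvAccumExc 0 sums
  if needed_reverse then pref.reverse else pref

-- ===== PRECONDITION & SPEC =====
def Spec_make_prefix (arr : List Int) (needed_reverse : Bool) (out : List Int) : Prop := out = make_prefix_alt arr needed_reverse
instance (arr : List Int) (needed_reverse : Bool) (out : List Int) : Decidable (Spec_make_prefix arr needed_reverse out) := by unfold Spec_make_prefix; infer_instance

-- ===== CLAIM (what is proved, stated in full; the proofs are below) =====
def Claim_equal_make_prefix : Prop := ∀ (arr : List Int) (needed_reverse : Bool), Dom_make_prefix arr needed_reverse → Spec_make_prefix arr needed_reverse (make_prefix arr needed_reverse)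

-- ===== LEMMAS AND PROOFS =====

-- G a j = sum of the first j inclusive prefix sums of a = the j-th entry of both results
def pvG (a : List Int) (j : Nat) : Int :=
  ((List.range j).map (fun t => (a.take (t + 1)).sum)).sum

theorem pvAccumInc_eq (xs : List Int) : ∀ c : Int,
    pvAccumInc c xs = (List.range xs.length).map (fun j => c + (xs.take (j + 1)).sum) := by
  induction xs with
  | nil => intro c; simp [pvAccumInc]
  | cons x t ih =>
    intro c
    simp only [pvAccumInc, List.length_cons, List.range_succ_eq_map, List.map_cons,
      List.map_map, ih (c + x)]
    congr 1
    · simp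
    · apply List.map_congr_left
      intro j _
      simp [List.take_succ_cons]
      ring

theorem pvAccumExc_eq (xs : List Int) : ∀ r : Int,
    pvAccumExc r xs = (List.range xs.length).map (fun j => r + (xs.take j).sum) := by
  induction xs with
  | nil => intro r; simp [pvAccumExc]
  | cons s t ih =>
    intro r
    simp only [pvAccumExc, List.length_cons, List.range_succ_eq_map, List.map_cons,
      List.map_map, ih (r + s)]
    congr 1
    · simp
    · apply List.map_congr_left
      intro j _
      simp [List.take_succ_cons]
      ring

theorem pvBcore_eq (a : List Int) :
    pvAccumExc 0 (pvAccumInc 0 a) = (List.range a.length).map (pvG a) := by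
  rw [pvAccumInc_eq, pvAccumExc_eq]
  simp only [List.length_map, List.length_range]
  apply List.map_congr_left
  intro j hj
  rw [List.mem_range] at hj
  rw [zero_add, ← List.map_take, List.take_range, Nat.min_eq_left (by omega : j ≤ a.length)]
  unfold pvG
  congr 1
  apply List.map_congr_left
  intro t _
  exact zero_add _

theorem pvG_succ (a : List Int) (k : Nat) :
    pvG a (k + 1) = pvG a k + (a.take (k + 1)).sum := by
  unfold pvG
  rw [List.range_succ, List.map_append, List.sum_append]
  simp

-- A's loop invariant: after processing i = 1..k-1 (k ≤ n), curr is the sum of the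
-- first k-1 elements and prefix holds pvG on the first k slots, zeros after.
theorem pvLoopA (a : List Int) : ∀ k : Nat, k ≤ a.length →
    (PySem.List.pyRange 1 (k : Int) 1).foldl (pvStepA a) (0, List.replicate a.length (0 : Int))
      = ((a.take (k - 1)).sum,
         (List.range k).map (pvG a) ++ List.replicate (a.length - k) (0 : Int)) := by
  intro k
  induction k with
  | zero =>
    intro _
    simp
  | succ k ih =>
    intro hk
    by_cases hk0 : k = 0
    · subst hk0
      have h1 : (PySem.List.pyRange 1 ((0 + 1 : Nat) : Int) 1) = [] := by
        simp [PySem.List.pyRange]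
      rw [h1, List.foldl_nil]
      have hrep : List.replicate a.length (0 : Int)
          = 0 :: List.replicate (a.length - 1) 0 := by
        have hn : a.length = (a.length - 1) + 1 := by omega
        conv_lhs => rw [hn]
        rfl
      rw [hrep]
      simp [pvG]
    · have hk1 : 1 ≤ (k : Int) := by omega
      have hcast : ((k + 1 : Nat) : Int) = (k : Int) + 1 := by push_cast; ring
      rw [hcast, PySem.List.pyRange_one_succ_right hk1, List.foldl_append,
        ih (by omega)]
      simp only [List.foldl_cons, List.foldl_nil, pvStepA]
      have hklen : k < a.length := by omega
      have hk1len : k - 1 < a.length := by omega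
      -- curr' = (a.take k).sum
      have hidx : (k : Int) - 1 = ((k - 1 : Nat) : Int) := by omega
      have hcurr : (a.take (k - 1)).sum + PySem.List.pyGetD a ((k : Int) - 1) 0
          = (a.take k).sum := by
        rw [hidx, PySem.List.pyGetD_natCast, List.getD_eq_getElem a 0 hk1len]
        have := List.sum_take_succ a (k - 1) hk1len
        rw [show (k - 1) + 1 = k by omega] at this
        omega
      rw [hcurr]
      -- the prefix list before and after the write
      have hlenmap : ((List.range k).map (pvG a)).length = k := by simp
      have hread : PySem.List.pyGetD
          ((List.range k).map (pvG a) ++ List.replicate (a.length - k) (0 : Int))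
          ((k : Int) - 1) 0 = pvG a (k - 1) := by
        rw [hidx, PySem.List.pyGetD_natCast,
          List.getD_append _ _ _ _ (by simp; omega),
          List.getD_eq_getElem _ 0 (by simp; omega)]
        simp
      rw [hread]
      have hval : pvG a (k - 1) + (a.take k).sum = pvG a k := by
        have := pvG_succ a (k - 1)
        rw [show (k - 1) + 1 = k by omega] at this
        omega
      rw [hval]
      -- the write lands on the head of the replicate block
      have hrep : List.replicate (a.length - k) (0 : Int)
          = 0 :: List.replicate (a.length - (k + 1)) 0 := by
        have hn : a.length - k = (a.length - (k + 1)) + 1 := by omega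
        conv_lhs => rw [hn]
        rfl
      rw [PySem.List.pySetD_natCast, List.set_append, if_neg (by simp),
        hlenmap]
      rw [show k - k = 0 from Nat.sub_self k, hrep, List.set_cons_zero]
      refine Prod.ext ?_ ?_
      · simp
      · simp only [List.range_succ, List.map_append, List.map_cons, List.map_nil,
          List.append_assoc, List.cons_append, List.nil_append]

theorem pvCore (a : List Int) :
    ((PySem.List.pyRange 1 (a.length : Int) 1).foldl (pvStepA a)
        (0, List.replicate a.length (0 : Int))).2
      = pvAccumExc 0 (pvAccumInc 0 a) := by
  rw [pvLoopA a a.length le_rfl, pvBcore_eq]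
  simp

-- ===== VERDICT (by name: the statement is the Claim_ definition above) =====
theorem make_prefix_spec : Claim_equal_make_prefix := by
  intro arr nr _
  unfold Spec_make_prefix make_prefix make_prefix_alt
  cases nr <;> simp only [reduceIte]
  · exact pvCore arr
  · have h := pvCore arr.reverse
    simp only [List.length_reverse] at h ⊢
    exact congrArg List.reverse h
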